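-- pv_equiv track=rewrite | github.com/nickcoury/fixed-time-running-analysis | scripts/scrape-raceresult.py | find_results_list
-- ===== SOURCE A (Python) =====
-- def find_results_list(config):
--     """Find the main results list."""
--     lists = config.get('TabConfig', {}).get('Lists', [])
--     for lst in lists:
--         name = lst['Name'].lower()
--         if 'overall' in name and 'result' in name:
--             return lst
--     for lst in lists:
--         if 'result' in lst['Name'].lower():
--             return lst
--     return lists[0] if lists else None
-- ===== SOURCE B (Python) =====
-- def find_results_list(config):
--     """Find the main results list (single pass tracking the best candidate)."""
--     lists = config.get('TabConfig', {}).get('Lists', [])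
--     best = None
--     for lst in lists:
--         name = lst['Name'].lower()
--         if 'overall' in name and 'result' in name:
--             return lst
--         if best is None and 'result' in name:
--             best = lst
--     if best is not None:
--         return best
--     return lists[0] if lists else None
-- ===== Notes on version B (the rewrite author's own statement) =====
-- stated objective: simpler
-- what changed: Replaces A's two priority scans over the lists with a single pass that returns immediately on an 'overall'+'result' name and otherwise records the first 'result' candidate, falling back to the first list.
import Mathlib
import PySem

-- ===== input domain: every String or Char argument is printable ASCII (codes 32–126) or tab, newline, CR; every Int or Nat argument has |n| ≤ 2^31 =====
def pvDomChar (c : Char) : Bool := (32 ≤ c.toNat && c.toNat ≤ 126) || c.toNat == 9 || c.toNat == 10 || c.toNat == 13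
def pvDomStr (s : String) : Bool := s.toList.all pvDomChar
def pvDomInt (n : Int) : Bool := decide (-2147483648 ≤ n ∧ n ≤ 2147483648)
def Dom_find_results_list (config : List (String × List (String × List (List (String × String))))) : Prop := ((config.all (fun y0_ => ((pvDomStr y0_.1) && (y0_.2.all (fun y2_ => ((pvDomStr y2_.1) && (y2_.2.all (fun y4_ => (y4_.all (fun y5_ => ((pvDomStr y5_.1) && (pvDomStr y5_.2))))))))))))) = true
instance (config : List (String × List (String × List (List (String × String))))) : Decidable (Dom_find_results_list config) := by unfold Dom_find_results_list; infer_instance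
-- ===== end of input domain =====

-- B is a simpler single pass: it returns immediately on an 'overall'+'result' name and otherwise
-- records the first 'result' candidate, instead of A's two priority scans.

-- shared helpers (the same expressions both Pythons compute)
def pvLists (config : List (String × List (String × List (List (String × String))))) : List (List (String × String)) :=
  PySem.Dict.getD (PySem.Dict.mk (PySem.Dict.getD (PySem.Dict.mk config) "TabConfig" [])) "Lists" []

-- lst['Name']; the KeyError case (get? = none) is excluded by Pre_, so getD "" is exact there
def pvName (lst : List (String × String)) : String :=
  (PySem.Dict.get? (PySem.Dict.mk lst) "Name").getD ""

def pvIsOR (lst : List (String × String)) : Bool :=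
  let name := PySem.Str.lower (pvName lst)
  PySem.Str.isIn "overall" name && PySem.Str.isIn "result" name

def pvIsR (lst : List (String × String)) : Bool :=
  PySem.Str.isIn "result" (PySem.Str.lower (pvName lst))

-- ===== PORT A =====
def pvALoop1 : List (List (String × String)) → Option (List (String × String))
  | [] => none
  | lst :: rest => if pvIsOR lst then some lst else pvALoop1 rest

def pvALoop2 : List (List (String × String)) → Option (List (String × String))
  | [] => none
  | lst :: rest => if pvIsR lst then some lst else pvALoop2 rest

def find_results_list (config : List (String × List (String × List (List (String × String))))) : Option (List (String × String)) :=
  let lists := pvLists config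
  match pvALoop1 lists with
  | some lst => some lst
  | none =>
    match pvALoop2 lists with
    | some lst => some lst
    | none => lists.head?          -- lists[0] if lists else None

-- ===== PORT B =====
def pvBGo (fallback : Option (List (String × String))) :
    List (List (String × String)) → Option (List (String × String)) → Option (List (String × String))
  | [], best => match best with
    | some b => some b
    | none => fallback
  | lst :: rest, best =>
    if pvIsOR lst then some lst
    else pvBGo fallback rest (if best.isNone && pvIsR lst then some lst else best)

def find_results_list_alt (config : List (String × List (String × List (List (String × String))))) : Option (List (String × String)) :=
  let lists := pvLists config
  pvBGo lists.head? lists none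

-- ===== PRECONDITION & SPEC =====
-- Pre_ excludes exactly the inputs where Python raises KeyError: some list lacks the 'Name' key
-- and no earlier list already matched the 'overall'+'result' condition (both A and B raise there).
def Pre_find_results_list (config : List (String × List (String × List (List (String × String))))) : Prop :=
  ∀ i < (pvLists config).length,
    ((PySem.Dict.get? (PySem.Dict.mk ((pvLists config).getD i [])) "Name").isSome = true)
    ∨ ∃ j < i, pvIsOR ((pvLists config).getD j []) = true

instance (config : List (String × List (String × List (List (String × String))))) : Decidable (Pre_find_results_list config) := by
  unfold Pre_find_results_list; infer_instance

def pvWitness_find_results_list : (List (String × List (String × List (List (String × String))))) :=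
  [("TabConfig", [("Lists", [[("Name", "Overall Results")], [("Name", "splits")]])])]

def Spec_find_results_list (config : List (String × List (String × List (List (String × String))))) (out : Option (List (String × String))) : Prop := out = find_results_list_alt config
instance (config : List (String × List (String × List (List (String × String))))) (out : Option (List (String × String))) : Decidable (Spec_find_results_list config out) := by unfold Spec_find_results_list; infer_instance

-- ===== CLAIM (what is proved, stated in full; the proofs are below) =====
def Claim_equal_find_results_list : Prop := ∀ (config : List (String × List (String × List (List (String × String))))), Dom_find_results_list config → Pre_find_results_list config → Spec_find_results_list config (find_results_list config)

-- ===== LEMMAS AND PROOFS =====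

-- loop invariant: B's single pass with state `best` equals A's two scans with `best` slotted between them
theorem pvBGo_invariant (fb : Option (List (String × String)))
    (lists : List (List (String × String))) (best : Option (List (String × String))) :
    pvBGo fb lists best =
      match pvALoop1 lists with
      | some x => some x
      | none =>
        match best with
        | some b => some b
        | none =>
          match pvALoop2 lists with
          | some y => some y
          | none => fb := by
  induction lists generalizing best with
  | nil => cases best <;> simp [pvBGo, pvALoop1, pvALoop2]
  | cons lst rest ih =>
    by_cases hor : pvIsOR lst
    · simp [pvBGo, pvALoop1, hor]
    · cases best with
      | some b => simp [pvBGo, pvALoop1, hor, ih]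
      | none =>
        by_cases hr : pvIsR lst
        · simp [pvBGo, pvALoop1, pvALoop2, hor, hr, ih]
        · simp [pvBGo, pvALoop1, pvALoop2, hor, hr, ih]

-- ===== VERDICT (by name: the statement is the Claim_ definition above) =====
theorem find_results_list_spec : Claim_equal_find_results_list := by
  intro config _ _
  unfold Spec_find_results_list find_results_list find_results_list_alt
  rw [pvBGo_invariant]
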